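-- pv_equiv track=rewrite | github.com/nampaca123/Bigdata_Algorithm | Algorithm_Training/Programmers/fruitvendor.py | solution
-- ===== SOURCE A (Python) =====
-- def solution(k,m,score):
--     maxprofit=0
--     score.sort()
--
--     for i in range(len(score)-m+1):
--         box=score[i:i+m]
--         minnum=min(box)
--         boxprofit=minnum*m
--         maxprofit=max(maxprofit,boxprofit)
--     return maxprofit
-- ===== SOURCE B (Python) =====
-- def solution(k, m, score):
--     # Sorted ascending: the minimum of window [i, i+m) is s[i], and s[i]*m is
--     # maximized at the last valid window start i = len(score) - m.
--     n = len(score)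
--     if m > n:
--         return 0
--     s = sorted(score)
--     return max(0, s[n - m] * m)
-- ===== Notes on version B (the rewrite author's own statement) =====
-- stated objective: faster
-- what changed: Replaced the scan over all m-windows (each doing min() over an m-slice) with the closed form max(0, sorted(score)[n-m]*m): on a sorted list the window minimum is its first element and it is largest at the last window, so no loop at all after sorting.
import Mathlib
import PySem

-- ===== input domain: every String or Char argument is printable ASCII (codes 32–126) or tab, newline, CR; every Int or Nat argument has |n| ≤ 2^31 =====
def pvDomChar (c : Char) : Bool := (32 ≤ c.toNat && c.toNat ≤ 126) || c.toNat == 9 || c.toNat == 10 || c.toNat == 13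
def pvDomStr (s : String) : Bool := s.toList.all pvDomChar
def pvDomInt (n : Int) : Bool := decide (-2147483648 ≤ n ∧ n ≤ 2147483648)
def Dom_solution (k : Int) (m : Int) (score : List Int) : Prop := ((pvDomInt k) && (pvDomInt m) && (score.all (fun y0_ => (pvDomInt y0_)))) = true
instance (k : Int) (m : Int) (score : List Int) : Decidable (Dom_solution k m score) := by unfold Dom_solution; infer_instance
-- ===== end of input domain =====

-- B replaces A's scan over every m-window (min over each slice) with the closed form
-- max(0, sorted(score)[n-m]*m); A sorts `score` in place (a side effect B does not have) —
-- the equivalence proved here is about the return value only.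

-- ===== PORT A =====
def solution (k : Int) (m : Int) (score : List Int) : Int :=
  let s := PySem.List.sorted score (fun x => x) false
  (PySem.List.pyRange 0 ((s.length : Int) - m + 1) 1).foldl
    (fun maxprofit i =>
      let box := PySem.List.slice s (some i) (some (i + m))
      -- min(box): none = Python's ValueError on an empty box, excluded by Pre_solution
      let minnum := (PySem.List.min? box (fun x => x)).getD 0
      max maxprofit (minnum * m)) 0

-- ===== PORT B =====
def solution_alt (k : Int) (m : Int) (score : List Int) : Int :=
  let n : Int := (score.length : Int)
  if m > n then 0
  else
    let s := PySem.List.sorted score (fun x => x) false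
    -- s[n-m]: in range whenever 1 ≤ m ≤ n (B's natural domain)
    max 0 (((PySem.List.pyGet? s (n - m)).getD 0) * m)

-- ===== PRECONDITION & SPEC =====
-- Pre_ excludes m ≤ 0, on which A raises ValueError (min() of an empty slice).
def Pre_solution (k : Int) (m : Int) (score : List Int) : Prop := 1 ≤ m
instance (k : Int) (m : Int) (score : List Int) : Decidable (Pre_solution k m score) := by unfold Pre_solution; infer_instance
def pvWitness_solution : Int × Int × List Int := (0, 2, [3, 1, 2, 5])
def Spec_solution (k : Int) (m : Int) (score : List Int) (out : Int) : Prop := out = solution_alt k m score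
instance (k : Int) (m : Int) (score : List Int) (out : Int) : Decidable (Spec_solution k m score out) := by unfold Spec_solution; infer_instance

-- ===== CLAIM (what is proved, stated in full; the proofs are below) =====
def Claim_equal_solution : Prop := ∀ (k : Int) (m : Int) (score : List Int), Dom_solution k m score → Pre_solution k m score → Spec_solution k m score (solution k m score)

-- ===== LEMMAS AND PROOFS =====

-- on a (≤)-sorted nonempty list, the running min is the head
theorem pv_foldl_min_head (x : Int) (t : List Int) (h : (x :: t).Pairwise (· ≤ ·)) :
    t.foldl min x = x := by
  rcases PySem.List.foldl_min_mem t x with heq | hmem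
  · exact heq
  · have h1 := (PySem.List.foldl_min_le t x).1
    have h2 : x ≤ t.foldl min x := (List.pairwise_cons.mp h).1 _ hmem
    omega

-- min of the m-slice of a sorted list starting at i is s[i]
theorem pv_slice_min (s : List Int) (hs : s.Pairwise (· ≤ ·)) (i M : Nat)
    (h1 : 1 ≤ M) (h2 : i + M ≤ s.length) :
    PySem.List.min? (PySem.List.slice s (some (i : Int)) (some ((i : Int) + (M : Int)))) (fun x => x)
      = some (s[i]'(by omega)) := by
  have hab : ((i : Int) + (M : Int)).toNat - ((i : Int)).toNat = M := by omega
  have hsl : PySem.List.slice s (some (i : Int)) (some ((i : Int) + (M : Int)))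
      = (s.drop i).take M := by
    have h0a : (0 : Int) ≤ (i : Int) := by exact_mod_cast Nat.zero_le i
    have h0b : (0 : Int) ≤ (i : Int) + (M : Int) := by omega
    rw [PySem.List.slice_toNat s h0a h0b, hab, Int.toNat_natCast]
  have hdrop : s.drop i = s[i]'(by omega) :: s.drop (i + 1) := by
    rw [List.drop_eq_getElem_cons (by omega)]
  have htake : (s.drop i).take M = s[i]'(by omega) :: (s.drop (i + 1)).take (M - 1) := by
    rw [hdrop]
    cases M with
    | zero => omega
    | succ M' => rw [List.take_succ_cons, Nat.add_sub_cancel]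
  have hsub : ((s.drop i).take M).Sublist s :=
    (List.take_sublist _ _).trans (List.drop_sublist _ _)
  rw [hsl, htake, PySem.List.min?_id_cons]
  congr 1
  apply pv_foldl_min_head
  rw [← htake]
  exact hs.sublist hsub

-- the accumulated max over window starts 0..j is max 0 (s[j]*m)
theorem pv_fold_max (s : List Int) (hs : s.Pairwise (· ≤ ·)) (M : Nat) (hM : 1 ≤ M)
    (m : Int) (hm : m = (M : Int)) (j : Nat) (hj : j + M ≤ s.length) :
    (PySem.List.pyRange 0 ((j : Int) + 1) 1).foldl
      (fun maxprofit i =>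
        max maxprofit ((PySem.List.min? (PySem.List.slice s (some i) (some (i + m))) (fun x => x)).getD 0 * m)) 0
      = max 0 (s[j]'(by omega) * m) := by
  induction j with
  | zero =>
    rw [show ((0 : Nat) : Int) + 1 = 0 + 1 by norm_num, PySem.List.pyRange_one_singleton]
    simp only [List.foldl_cons, List.foldl_nil]
    rw [show ((0 : Int) + m) = ((0 : Nat) : Int) + (M : Int) by omega,
        show (0 : Int) = ((0 : Nat) : Int) by norm_num,
        pv_slice_min s hs 0 M hM (by omega)]
    rfl
  | succ j' ih =>
    have h1 : (0 : Int) ≤ (j' : Int) + 1 := by positivity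
    rw [show ((j' + 1 : Nat) : Int) + 1 = ((j' : Int) + 1) + 1 by push_cast; ring,
        PySem.List.pyRange_one_succ_right h1, List.foldl_append, ih (by omega)]
    simp only [List.foldl_cons, List.foldl_nil]
    rw [show ((j' : Int) + 1) + m = ((j' + 1 : Nat) : Int) + (M : Int) by push_cast; omega,
        show (j' : Int) + 1 = ((j' + 1 : Nat) : Int) by push_cast; ring,
        pv_slice_min s hs (j' + 1) M hM (by omega)]
    have hle : s[j']'(by omega) ≤ s[j' + 1]'(by omega) :=
      List.pairwise_iff_getElem.mp hs j' (j' + 1) (by omega) (by omega) (by omega)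
    have hmul : s[j']'(by omega) * m ≤ s[j' + 1]'(by omega) * m := by
      apply mul_le_mul_of_nonneg_right hle (by omega)
    simp only [Option.getD_some]
    omega

-- ===== VERDICT (by name: the statement is the Claim_ definition above) =====
theorem solution_spec : Claim_equal_solution := by
  intro k m score _ hpre
  unfold Spec_solution solution solution_alt
  simp only
  set s := PySem.List.sorted score (fun x => x) false with hsdef
  have hlen : s.length = score.length := PySem.List.length_sorted _ _ _
  have hs : s.Pairwise (· ≤ ·) := PySem.List.sorted_pairwise score (fun x => x)
  by_cases hbig : m > (score.length : Int)
  · rw [if_pos hbig, PySem.List.pyRange_one_eq_nil (by omega)]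
    rfl
  · rw [if_neg hbig]
    have hpre' : (1 : Int) ≤ m := hpre
    obtain ⟨M, hM⟩ : ∃ M : Nat, m = (M : Int) := ⟨m.toNat, by omega⟩
    have hM1 : 1 ≤ M := by omega
    have hMn : M ≤ s.length := by omega
    have hrng : (s.length : Int) - m + 1 = ((s.length - M : Nat) : Int) + 1 := by
      push_cast [Nat.cast_sub hMn]; omega
    rw [hrng, pv_fold_max s hs M hM1 m hM (s.length - M) (by omega)]
    have hidx : (score.length : Int) - m = ((s.length - M : Nat) : Int) := by
      rw [← hlen]; push_cast [Nat.cast_sub hMn]; omega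
    rw [hidx, PySem.List.pyGet?_natCast]
    have hlt : s.length - M < s.length := by omega
    simp [hlt]
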